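-- pv_equiv track=rewrite | github.com/ShapeLayer/training | tasks/online_judge/baekjoon/python/15780.py | compute
-- ===== SOURCE A (Python) =====
-- def compute(n: int, k: int, a: int) -> int:
--     sums = 0
--     for each in a:
--         if each % 2 == 0:
--             sums += each // 2
--         else:
--             sums += each // 2 + 1
--     return sums - n
-- ===== SOURCE B (Python) =====
-- def compute(n: int, k: int, a: int) -> int:
--     # Divide-and-conquer: recursively split the list in halves; a leaf
--     # contributes ceil(x/2) written as -(-x // 2). Recursion depth is O(log n).
--     def halves(lst):
--         if not lst:
--             return 0
--         if len(lst) == 1: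
--             return -(-lst[0] // 2)
--         m = len(lst) // 2
--         return halves(lst[:m]) + halves(lst[m:])
--     return halves(a) - n
-- ===== Notes on version B (the rewrite author's own statement) =====
-- stated objective: alternative
-- what changed: Replaced the single left-to-right fold with a per-element even/odd branch by a divide-and-conquer recursion that splits the list in halves and computes each leaf's contribution by the branch-free ceiling formula -(-x//2).
import Mathlib
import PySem

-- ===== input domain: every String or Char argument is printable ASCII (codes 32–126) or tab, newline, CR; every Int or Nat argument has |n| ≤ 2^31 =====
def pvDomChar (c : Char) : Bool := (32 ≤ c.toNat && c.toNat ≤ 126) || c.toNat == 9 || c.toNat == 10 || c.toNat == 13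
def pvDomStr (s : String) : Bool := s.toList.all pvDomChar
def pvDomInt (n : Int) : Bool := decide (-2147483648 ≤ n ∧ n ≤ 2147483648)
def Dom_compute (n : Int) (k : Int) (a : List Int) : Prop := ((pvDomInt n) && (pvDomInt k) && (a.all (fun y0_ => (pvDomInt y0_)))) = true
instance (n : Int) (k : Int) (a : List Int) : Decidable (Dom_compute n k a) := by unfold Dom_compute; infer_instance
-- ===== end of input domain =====

-- B replaces A's single left-to-right fold (even/odd branch per element) by a
-- divide-and-conquer recursion on list halves with the branch-free ceiling
-- formula -(-x//2) at the leaves (objective: alternative, same result).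


-- ===== PORT A =====
def compute (n : Int) (k : Int) (a : List Int) : Int :=
  (a.foldl (fun sums each =>
    if PySem.Int.mod each 2 == 0 then
      sums + PySem.Int.floordiv each 2
    else
      sums + PySem.Int.floordiv each 2 + 1) 0) - n

-- ===== PORT B =====
-- helper `halves` of Source B: split the list in halves, leaves give -(-x // 2)
def computeHalves : List Int → Int
  | [] => 0
  | [x] => -(PySem.Int.floordiv (-x) 2)
  | x :: y :: rest =>
    let l := x :: y :: rest
    let m := l.length / 2
    computeHalves (l.take m) + computeHalves (l.drop m)
termination_by l => l.length
decreasing_by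
  · simp only [List.length_take, List.length_cons]; omega
  · simp only [List.length_drop, List.length_cons]; omega

def compute_alt (n : Int) (k : Int) (a : List Int) : Int :=
  computeHalves a - n

-- ===== PRECONDITION & SPEC =====
def Spec_compute (n : Int) (k : Int) (a : List Int) (out : Int) : Prop := out = compute_alt n k a
instance (n : Int) (k : Int) (a : List Int) (out : Int) : Decidable (Spec_compute n k a out) := by unfold Spec_compute; infer_instance

-- ===== CLAIM (what is proved, stated in full; the proofs are below) =====
def Claim_equal_compute : Prop := ∀ (n : Int) (k : Int) (a : List Int), Dom_compute n k a → Spec_compute n k a (compute n k a)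

-- ===== LEMMAS AND PROOFS =====

-- the per-element ceiling: -(-x // 2) equals A's even/odd branch value
theorem ceilHalf_branch (x : Int) :
    -(PySem.Int.floordiv (-x) 2)
    = (if PySem.Int.mod x 2 == 0 then PySem.Int.floordiv x 2
       else PySem.Int.floordiv x 2 + 1) := by
  rw [PySem.Int.mod_eq_emod_of_pos (by omega : (0:Int) < 2),
      PySem.Int.floordiv_eq_ediv_of_pos (by omega : (0:Int) < 2),
      PySem.Int.floordiv_eq_ediv_of_pos (by omega : (0:Int) < 2)]
  split_ifs with h <;> simp only [beq_iff_eq] at * <;> omega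

-- B's divide-and-conquer equals the sum of the per-element ceilings
theorem computeHalves_eq_sum (l : List Int) :
    computeHalves l = (l.map (fun x => -(PySem.Int.floordiv (-x) 2))).sum := by
  induction l using computeHalves.induct with
  | case1 => simp [computeHalves]
  | case2 x => simp [computeHalves]
  | case3 x y rest l m ih1 ih2 =>
    rw [computeHalves]
    rw [ih1, ih2, ← List.sum_append, ← List.map_append, List.take_append_drop]

-- A's fold equals the start plus the sum of the per-element branch values
theorem compute_fold_eq_sum (l : List Int) : ∀ (s : Int),
    (l.foldl (fun sums each =>
      if PySem.Int.mod each 2 == 0 then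
        sums + PySem.Int.floordiv each 2
      else
        sums + PySem.Int.floordiv each 2 + 1) s)
    = s + (l.map (fun x => -(PySem.Int.floordiv (-x) 2))).sum := by
  induction l with
  | nil => intro s; simp
  | cons x xs ih =>
    intro s
    simp only [List.foldl_cons, List.map_cons, List.sum_cons, ih]
    rw [ceilHalf_branch x]
    split_ifs <;> ring

-- ===== VERDICT (by name: the statement is the Claim_ definition above) =====
theorem compute_spec : Claim_equal_compute := by
  intro n k a _
  unfold Spec_compute compute compute_alt
  rw [compute_fold_eq_sum, computeHalves_eq_sum]
  ring
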